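-- pv_equiv track=rewrite | github.com/Woolfer0097/UGE_IT | olymp granit nauki/48.py | foo
-- ===== SOURCE A (Python) =====
-- def foo(n):
--     if n == 1:
--         return 1
--     else:
--         if n % 2 == 0:
--             return n + foo(n - 1)
--         else:
--             return 2 * foo(n - 2)
-- ===== SOURCE B (Python) =====
-- def foo(n):
--     # closed form: odd n = 2k+1 -> 2**k ; even n = 2m -> 2m + 2**(m-1)
--     if n % 2 == 1:
--         return 2 ** ((n - 1) // 2)
--     else:
--         return n + 2 ** (n // 2 - 1)
-- ===== Notes on version B (the rewrite author's own statement) =====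
-- stated objective: faster
-- what changed: Replaces the linear recursion with its closed form: a single power-of-two exponentiation chosen by the parity of the input.
import Mathlib
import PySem

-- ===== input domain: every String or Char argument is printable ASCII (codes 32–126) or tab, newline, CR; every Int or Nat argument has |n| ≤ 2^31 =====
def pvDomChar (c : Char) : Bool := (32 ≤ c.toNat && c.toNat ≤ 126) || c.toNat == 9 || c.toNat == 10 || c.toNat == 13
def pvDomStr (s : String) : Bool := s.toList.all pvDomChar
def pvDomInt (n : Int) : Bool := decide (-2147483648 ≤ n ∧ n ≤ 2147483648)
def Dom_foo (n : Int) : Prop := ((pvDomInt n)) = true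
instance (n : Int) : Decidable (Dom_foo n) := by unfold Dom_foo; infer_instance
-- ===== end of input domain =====

-- B replaces A's O(n) recursion with its closed form (one exponentiation); Pre_ admits exactly the positive inputs; elsewhere A recurses without bound (RecursionError).


-- ===== PORT A =====
-- literal transliteration of A; the nonpositive guard only makes the recursion
-- total in Lean (Python recurses forever on nonpositive n; those are outside Pre_foo)
def foo (n : Int) : Int :=
  if n = 1 then 1
  else if n ≤ 0 then 0
  else if n % 2 = 0 then n + foo (n - 1)
  else 2 * foo (n - 2)
termination_by n.toNat
decreasing_by all_goals omega

-- ===== PORT B =====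
def foo_alt (n : Int) : Int :=
  if n % 2 = 1 then 2 ^ ((n - 1) / 2).toNat
  else n + 2 ^ (n / 2 - 1).toNat

-- ===== PRECONDITION & SPEC =====
-- Pre_: on nonpositive inputs A recurses without bound (RecursionError)
def Pre_foo (n : Int) : Prop := 1 ≤ n
instance (n : Int) : Decidable (Pre_foo n) := by unfold Pre_foo; infer_instance
def pvWitness_foo : Int := (5)
def Spec_foo (n : Int) (out : Int) : Prop := out = foo_alt n
instance (n : Int) (out : Int) : Decidable (Spec_foo n out) := by unfold Spec_foo; infer_instance

-- ===== CLAIM (what is proved, stated in full; the proofs are below) =====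
def Claim_equal_foo : Prop := ∀ (n : Int), Dom_foo n → Pre_foo n → Spec_foo n (foo n)

-- ===== LEMMAS AND PROOFS =====
theorem foo_eq_alt (k : Nat) : ∀ (n : Int), n.toNat ≤ k → 1 ≤ n → foo n = foo_alt n := by
  induction k with
  | zero => intro n hk h1; omega
  | succ k ih =>
    intro n hk h1
    rw [foo]
    by_cases h1' : n = 1
    · subst h1'; simp [foo_alt]
    · by_cases he : n % 2 = 0
      · -- even n ≥ 2
        have h2 : 2 ≤ n := by omega
        rw [if_neg h1', if_neg (by omega), if_pos he]
        have hrec := ih (n - 1) (by omega) (by omega)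
        rw [hrec]
        have ho : (n - 1) % 2 = 1 := by omega
        simp only [foo_alt, if_pos ho, if_neg (by omega : ¬ n % 2 = 1)]
        have : (n - 1 - 1) / 2 = n / 2 - 1 := by omega
        rw [this]
      · -- odd n ≥ 3
        have ho : n % 2 = 1 := by omega
        have h3 : 3 ≤ n := by omega
        rw [if_neg h1', if_neg (by omega), if_neg he]
        have hrec := ih (n - 2) (by omega) (by omega)
        rw [hrec]
        have ho2 : (n - 2) % 2 = 1 := by omega
        simp only [foo_alt, if_pos ho2, if_pos ho]
        have hx : ((n - 1) / 2).toNat = ((n - 2 - 1) / 2).toNat + 1 := by omega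
        rw [hx, pow_succ]
        ring

-- ===== VERDICT (by name: the statement is the Claim_ definition above) =====
theorem foo_spec : Claim_equal_foo := by
  intro n _ h1
  exact foo_eq_alt n.toNat n (le_refl _) h1
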